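-- pv_equiv track=rewrite | github.com/abechoi23/week4_day1_hw | whiteboard/whiteboard.py | check_lucky_effecient
-- ===== SOURCE A (Python) =====
-- def check_lucky_effecient(alist):
--     hash_map,output = {}, []
--     for num in alist:
--         hash_map[num] = hash_map.get(num,0)+1
--         """
--         if num not in hash_map:
--             hash_map[num] = 0
--         hash_map[num] += 1
--         """
--
--     for num, num_count in hash_map.items():
--         if num == num_count:
--             output.append(num)
--     #output = [num for num, num_count in hash_map.items() if num == count]
--     return max(output) if output else -1
-- ===== SOURCE B (Python) =====
-- def check_lucky_effecient(alist):
--     best = -1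
--     prev = None
--     run = 0
--     for v in sorted(alist):
--         if prev == v:
--             run += 1
--         else:
--             if prev == run:
--                 best = prev
--             prev, run = v, 1
--     if prev == run:
--         best = prev
--     return best
-- ===== Notes on version B (the rewrite author's own statement) =====
-- stated objective: alternative
-- what changed: Replaces the frequency hashmap plus filtered-list max with a single sort-then-scan over consecutive runs that keeps a running best.
import Mathlib
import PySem

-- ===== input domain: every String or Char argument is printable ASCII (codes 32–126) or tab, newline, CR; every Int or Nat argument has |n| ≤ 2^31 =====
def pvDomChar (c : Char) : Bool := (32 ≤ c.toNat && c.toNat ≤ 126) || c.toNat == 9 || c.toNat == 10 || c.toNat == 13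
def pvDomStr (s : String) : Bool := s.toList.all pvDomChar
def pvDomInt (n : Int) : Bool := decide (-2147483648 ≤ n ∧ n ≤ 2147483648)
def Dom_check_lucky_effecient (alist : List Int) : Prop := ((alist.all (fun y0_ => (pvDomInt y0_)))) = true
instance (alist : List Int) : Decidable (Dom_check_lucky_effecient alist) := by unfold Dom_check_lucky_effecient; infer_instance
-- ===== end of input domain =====

-- B replaces the frequency hashmap + filtered max with a sort-then-scan over consecutive runs (alternative decomposition, not claimed faster).

-- ===== PORT A =====
def check_lucky_effecient (alist : List Int) : Int :=
  let hash_map : PySem.Dict Int Int :=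
    alist.foldl (fun d num => d.insert num (d.getD num 0 + 1)) PySem.Dict.empty
  let output : List Int :=
    hash_map.items.foldl (fun out p => if p.1 = p.2 then out ++ [p.1] else out) []
  match PySem.List.max? output (fun x => x) with
  | some m => m
  | none => -1

-- ===== PORT B =====
-- the 'if prev == run: best = prev' step of Source B (run both at a value change and after the loop)
def pvFinish (best : Int) (prev : Option Int) (run : Int) : Int :=
  match prev with
  | some p => if p = run then p else best
  | none => best

-- the 'for v in sorted(alist)' loop of Source B, state (best, prev, run)
def pvScan (best : Int) (prev : Option Int) (run : Int) : List Int → Int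
  | [] => pvFinish best prev run
  | v :: t =>
      if prev = some v then pvScan best prev (run + 1) t
      else pvScan (pvFinish best prev run) (some v) 1 t

def check_lucky_effecient_alt (alist : List Int) : Int :=
  pvScan (-1) none 0 (PySem.List.sorted alist (fun x => x) false)

-- ===== PRECONDITION & SPEC =====
def Spec_check_lucky_effecient (alist : List Int) (out : Int) : Prop := out = check_lucky_effecient_alt alist
instance (alist : List Int) (out : Int) : Decidable (Spec_check_lucky_effecient alist out) := by unfold Spec_check_lucky_effecient; infer_instance

-- ===== CLAIM (what is proved, stated in full; the proofs are below) =====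
def Claim_equal_check_lucky_effecient : Prop := ∀ (alist : List Int), Dom_check_lucky_effecient alist → Spec_check_lucky_effecient alist (check_lucky_effecient alist)

-- ===== LEMMAS AND PROOFS =====

-- consuming a run of further copies of the current value only increments the counter
theorem pvScan_replicate (v : Int) (t : List Int) :
    ∀ (n : Nat) (best run : Int),
    pvScan best (some v) run (List.replicate n v ++ t) = pvScan best (some v) (run + n) t := by
  intro n
  induction n with
  | zero => intro best run; simp
  | succ k ih =>
      intro best run
      simp only [List.replicate_succ, List.cons_append, pvScan, if_true, ih]
      congr 1
      push_cast
      ring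

-- scanning the concatenation of the runs of a strictly increasing value list folds the "record if lucky" step over the values
theorem pvScan_blocks (c : Int → Nat) :
    ∀ (vs : List Int) (best : Int) (prev : Option Int) (run : Int),
    vs.Pairwise (· < ·) → (∀ v ∈ vs, 1 ≤ c v) → (∀ v, prev = some v → v ∉ vs) →
    pvScan best prev run ((vs.map (fun v => List.replicate (c v) v)).flatten)
      = vs.foldl (fun b v => if v = ((c v : Nat) : Int) then v else b) (pvFinish best prev run) := by
  intro vs
  induction vs with
  | nil => intro best prev run _ _ _; simp [pvScan]
  | cons v vs ih =>
      intro best prev run hpw hc hprev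
      have hc1 : 1 ≤ c v := hc v (by simp)
      obtain ⟨m, hm⟩ : ∃ m, c v = m + 1 := ⟨c v - 1, by omega⟩
      have hne : prev ≠ some v := fun h => hprev v h (by simp)
      simp only [List.map_cons, List.flatten_cons, hm, List.replicate_succ, List.cons_append,
        pvScan, if_neg hne]
      rw [pvScan_replicate]
      have hvnot : v ∉ vs := fun h => absurd ((List.pairwise_cons.mp hpw).1 v h) (lt_irrefl v)
      rw [ih (pvFinish best prev run) (some v) (1 + m)
            (List.pairwise_cons.mp hpw).2
            (fun w hw => hc w (by simp [hw]))
            (fun w hw => by cases hw; exact hvnot)]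
      simp only [List.foldl_cons]
      congr 1
      simp only [pvFinish, hm]
      push_cast
      rw [add_comm (1 : Int) (m : Int)]

-- count of x in the concatenation of the runs of a nodup value list
theorem count_blocks (c : Int → Nat) (x : Int) :
    ∀ (vs : List Int), vs.Nodup →
    ((vs.map (fun v => List.replicate (c v) v)).flatten).count x
      = if x ∈ vs then c x else 0 := by
  intro vs
  induction vs with
  | nil => simp
  | cons v vs ih =>
      intro hnd
      simp only [List.map_cons, List.flatten_cons, List.count_append, List.count_replicate,
        ih (List.nodup_cons.mp hnd).2]
      by_cases hxv : x = v
      · subst hxv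
        simp [(List.nodup_cons.mp hnd).1]
      · simp [hxv, Ne.symm hxv]

-- the concatenation of the runs of a strictly increasing value list is nondecreasing
theorem blocks_pairwise (c : Int → Nat) (vs : List Int) (h : vs.Pairwise (· < ·)) :
    ((vs.map (fun v => List.replicate (c v) v)).flatten).Pairwise (· ≤ ·) := by
  rw [List.pairwise_flatten]
  constructor
  · intro l hl
    obtain ⟨v, _, rfl⟩ := List.mem_map.mp hl
    exact List.pairwise_replicate_of_refl
  · refine List.Pairwise.map _ ?_ h
    intro u w huw a ha b hb
    rw [List.eq_of_mem_replicate ha, List.eq_of_mem_replicate hb]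
    exact le_of_lt huw

-- appending in front only changes the default of getLast?.getD
theorem getLast?_getD_cons (l : List Int) (v b : Int) :
    ((v :: l).getLast?).getD b = (l.getLast?).getD v := by
  cases l with
  | nil => rfl
  | cons w t =>
      rw [List.getLast?_cons_cons]
      cases h : (w :: t).getLast? with
      | none => exact absurd h (by simp)
      | some x => rfl

-- a fold that overwrites the accumulator on a test keeps the last passing element
theorem foldl_overwrite (q : Int → Prop) [DecidablePred q] :
    ∀ (l : List Int) (b : Int),
    l.foldl (fun b v => if q v then v else b) b
      = ((l.filter (fun v => decide (q v))).getLast?).getD b := by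
  intro l
  induction l with
  | nil => intro b; rfl
  | cons v t ih =>
      intro b
      by_cases hv : q v
      · simp only [List.foldl_cons, if_pos hv, List.filter_cons, decide_eq_true hv, ite_true, ih]
        rw [getLast?_getD_cons]
      · simp only [List.foldl_cons, if_neg hv, List.filter_cons, decide_eq_false hv,
          Bool.false_eq_true, ite_false, ih]

-- in a strictly increasing list every element is at most the last one
theorem le_getLast_of_pairwise :
    ∀ (l : List Int), l.Pairwise (· < ·) →
    ∀ y ∈ l, ∀ b, y ≤ (l.getLast?).getD b := by
  intro l
  induction l with
  | nil => intro _ y hy; cases hy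
  | cons v t ih =>
      intro hpw y hy b
      rw [getLast?_getD_cons]
      rcases List.mem_cons.mp hy with rfl | hyt
      · cases t with
        | nil => simp
        | cons w t' =>
            cases h : (w :: t').getLast? with
            | none => exact absurd h (by simp)
            | some x =>
                simp only [Option.getD_some]
                exact le_of_lt ((List.pairwise_cons.mp hpw).1 x (List.mem_of_getLast? h))
      · exact ih (List.pairwise_cons.mp hpw).2 y hyt v

-- sorted(alist) is the concatenation of the runs of the strictly increasing distinct values
theorem sorted_eq_blocks (alist : List Int) :
    PySem.List.sorted alist (fun x => x) false
      = (((PySem.List.sorted (PySem.Set.ofList alist) (fun x => x) false).map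
          (fun v => List.replicate (alist.count v) v)).flatten) := by
  set D := PySem.List.sorted (PySem.Set.ofList alist) (fun x => x) false with hD
  have hDpw : D.Pairwise (· < ·) := PySem.List.sorted_ofList_pairwise_lt alist
  have hDnd : D.Nodup := hDpw.nodup
  have hmemD : ∀ x, x ∈ D ↔ x ∈ alist := by
    intro x
    rw [hD, PySem.List.mem_sorted]
    exact PySem.Set.mem_ofList alist x
  apply PySem.List.sorted_id_eq_of_perm_of_pairwise
  · rw [List.perm_iff_count]
    intro x
    rw [count_blocks _ x D hDnd]
    by_cases hx : x ∈ alist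
    · simp [(hmemD x).mpr hx]
    · simp [List.count_eq_zero.mpr hx]

  · exact blocks_pairwise _ D hDpw

-- A's output list is the lucky values among the distinct elements, in first-occurrence order
theorem outputA_eq (alist : List Int) :
    (alist.foldl (fun d num => d.insert num (d.getD num 0 + 1))
        (PySem.Dict.empty : PySem.Dict Int Int)).items.foldl
        (fun out p => if p.1 = p.2 then out ++ [p.1] else out) []
      = (PySem.Set.ofList alist).filter (fun k => decide (k = ((alist.count k : Nat) : Int))) := by
  rw [PySem.Dict.foldl_insert_getD_add_one_eq_counter, PySem.Dict.items_counter,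
    PySem.List.foldl_append_ite (p := fun p : Int × Int => p.1 = p.2) (f := fun p => p.1)]
  rw [List.filter_map, List.map_map]
  simp [Function.comp_def]

-- ===== VERDICT (by name: the statement is the Claim_ definition above) =====
theorem check_lucky_effecient_spec : Claim_equal_check_lucky_effecient := by
  intro alist _
  simp only [Spec_check_lucky_effecient, check_lucky_effecient, check_lucky_effecient_alt]
  set D := PySem.List.sorted (PySem.Set.ofList alist) (fun x => x) false with hD
  have hDpw : D.Pairwise (· < ·) := PySem.List.sorted_ofList_pairwise_lt alist
  have hmemD : ∀ x, x ∈ D ↔ x ∈ alist := by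
    intro x
    rw [hD, PySem.List.mem_sorted]
    exact PySem.Set.mem_ofList alist x
  -- B's value
  rw [sorted_eq_blocks alist, ← hD,
    pvScan_blocks (fun v => alist.count v) D (-1) none 0 hDpw
      (fun v hv => List.count_pos_iff.mpr ((hmemD v).mp hv)) (fun v h => by cases h),
    foldl_overwrite (fun v => v = ((alist.count v : Nat) : Int)) D (pvFinish (-1) none 0)]
  -- A's value
  rw [outputA_eq alist]
  set p : Int → Bool := fun k => decide (k = ((alist.count k : Nat) : Int)) with hp
  set F : List Int := (PySem.Set.ofList alist).filter p with hF
  set F' : List Int := D.filter p with hF'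
  have hperm : F'.Perm F := List.Perm.filter p (PySem.List.sorted_perm _ _ _)
  have hF'pw : F'.Pairwise (· < ·) := hDpw.filter p
  have hfin : pvFinish (-1) none 0 = -1 := rfl
  rw [hfin]
  cases hmax : PySem.List.max? F (fun x => x) with
  | none =>
      have : F = [] := (PySem.List.max?_eq_none_iff _ _).mp hmax
      have hF'nil : F' = [] := List.eq_nil_of_length_eq_zero (by
        rw [hperm.length_eq, this]; rfl)
      simp [hF'nil]
  | some m =>
      have hmF : m ∈ F := PySem.List.max?_mem hmax
      have hmF' : m ∈ F' := hperm.mem_iff.mpr hmF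
      have hF'ne : F' ≠ [] := fun h => by simp [h] at hmF'
      obtain ⟨x, hx⟩ : ∃ x, F'.getLast? = some x := by
        cases h : F'.getLast? with
        | none => exact absurd (List.getLast?_eq_none_iff.mp h) hF'ne
        | some x => exact ⟨x, rfl⟩
      have hxF' : x ∈ F' := List.mem_of_getLast? hx
      have h1 : m ≤ x := by
        have := le_getLast_of_pairwise F' hF'pw m hmF' (-1)
        rwa [hx, Option.getD_some] at this
      have h2 : x ≤ m := PySem.List.max?_isMax hmax x (hperm.mem_iff.mp hxF')
      rw [hx, Option.getD_some]
      change m = x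
      omega
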